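-- pv_equiv track=rewrite | github.com/sblunt/Advent-of-Code | 2024/Day9/part2.py | move_number_group
-- ===== SOURCE A (Python) =====
-- def move_number_group(whole_list, number_value, number_start_index, number_numrepeat):
--
--     num_spaces = 0
--     for i, entry in enumerate(whole_list):
--         if entry == ".":
--             num_spaces += 1
--         else:
--             num_spaces = 0
--
--         if i < number_start_index:
--             if num_spaces == number_numrepeat:
--
--                 # update new position
--                 whole_list[i + 1 - number_numrepeat : i + 1] = number_value
--
--                 # update old position
--                 whole_list[
--                     number_start_index : number_start_index + number_numrepeat
--                 ] = "."
--
--                 return whole_list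
--
--     return whole_list
-- ===== SOURCE B (Python) =====
-- # B: locate the first gap big enough via one substring search on a '.'/'#' mask
-- # of the cells before the block, instead of scanning with a run-length counter.
-- def move_number_group(whole_list, number_value, number_start_index, number_numrepeat):
--     mask = "".join("." if entry == "." else "#"
--                    for i, entry in enumerate(whole_list) if i < number_start_index)
--     idx = mask.find("." * number_numrepeat) if number_numrepeat <= len(mask) else -1
--     if idx != -1:
--         whole_list[idx:idx + number_numrepeat] = number_value
--         whole_list[number_start_index:number_start_index + number_numrepeat] = "."
--     return whole_list
-- ===== Notes on version B (the rewrite author's own statement) =====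
-- stated objective: idiomatic
-- what changed: B finds the first fitting gap with one substring search ('.'*number_numrepeat) on a '.'/'#' mask of the cells before the block, instead of A's incremental run-length counter over the whole list; Pre_ restricts to the natural domain number_numrepeat >= 1 (a block has at least one cell), outside of which A's values are an accident of its run counter hitting 0.
-- outside the precondition, e.g. on move_number_group(['1', '.'], ['7'], 2, 0): A returns ['1', '7', '.', '.'], B returns ['7', '1', '.', '.']; on move_number_group(['.'], ['7'], 1, -1): A returns ['.'], B returns ['7', '.', '.']
import Mathlib
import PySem

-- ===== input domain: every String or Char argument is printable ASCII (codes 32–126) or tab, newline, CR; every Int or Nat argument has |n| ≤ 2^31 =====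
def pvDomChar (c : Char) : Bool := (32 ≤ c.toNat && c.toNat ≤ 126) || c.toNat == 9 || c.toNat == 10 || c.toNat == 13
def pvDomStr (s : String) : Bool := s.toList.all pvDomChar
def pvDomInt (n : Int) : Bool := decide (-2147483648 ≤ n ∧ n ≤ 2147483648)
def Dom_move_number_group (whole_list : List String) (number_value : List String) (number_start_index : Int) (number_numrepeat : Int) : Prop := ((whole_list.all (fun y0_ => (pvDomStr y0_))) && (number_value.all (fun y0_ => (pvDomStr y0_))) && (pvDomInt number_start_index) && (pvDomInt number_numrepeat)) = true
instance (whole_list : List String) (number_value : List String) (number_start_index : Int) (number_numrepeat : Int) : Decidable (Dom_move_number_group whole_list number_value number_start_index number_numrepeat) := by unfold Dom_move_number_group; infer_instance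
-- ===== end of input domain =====

-- B finds the gap by one substring search on a '.'/'#' prefix mask instead of A's
-- incremental run counter (objective: idiomatic). Both Pythons mutate whole_list in
-- place via the same slice assignments; the equivalence proved here is about the return value.

-- Python slice assignment l[a:b] = v (step 1): exact clamping semantics of CPython.
def pyClampIdx (n : Nat) (i : Int) : Nat := if i < 0 then ((n : Int) + i).toNat else min i.toNat n

def pySliceAssign (l : List String) (a b : Int) (v : List String) : List String :=
  let a' := pyClampIdx l.length a
  let b' := max a' (pyClampIdx l.length b)
  l.take a' ++ v ++ l.drop b'

-- ===== PORT A =====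
-- the for-loop of A: list being scanned, enumerate index i, num_spaces ns; early return on trigger
def moveA_loop (wl nv : List String) (start k : Int) : List String → Nat → Int → List String
  | [], _, _ => wl
  | e :: rest, i, ns =>
    let ns' : Int := if e = "." then ns + 1 else 0
    if (i : Int) < start then
      if ns' = k then
        pySliceAssign (pySliceAssign wl ((i : Int) + 1 - k) ((i : Int) + 1) nv) start (start + k) ["."]
      else moveA_loop wl nv start k rest (i + 1) ns'
    else moveA_loop wl nv start k rest (i + 1) ns'

def move_number_group (whole_list : List String) (number_value : List String) (number_start_index : Int) (number_numrepeat : Int) : List String :=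
  moveA_loop whole_list number_value number_start_index number_numrepeat whole_list 0 0

-- ===== PORT B =====
def maskChar (e : String) : Char := if e = "." then '.' else '#'

-- the genexp "'.' if entry == '.' else '#' for i, entry in enumerate(whole_list) if i < number_start_index"
def maskOf (start : Int) : List String → Nat → List Char
  | [], _ => []
  | e :: rest, i => if (i : Int) < start then maskChar e :: maskOf start rest (i + 1) else maskOf start rest (i + 1)

def move_number_group_alt (whole_list : List String) (number_value : List String) (number_start_index : Int) (number_numrepeat : Int) : List String :=
  let mask : String := String.ofList (maskOf number_start_index whole_list 0)
  let idx : Int := if number_numrepeat ≤ (PySem.Str.len mask : Int) then PySem.Str.find mask (String.ofList (List.replicate number_numrepeat.toNat '.')) else -1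
  if idx ≠ -1 then
    pySliceAssign (pySliceAssign whole_list idx (idx + number_numrepeat) number_value) number_start_index (number_start_index + number_numrepeat) ["."]
  else whole_list

-- ===== PRECONDITION & SPEC =====
-- Pre_ restricts to the natural domain: the block being moved has at least one cell
-- (number_numrepeat ≥ 1); for number_numrepeat ≤ 0 A still returns, but its values are an
-- accident of its run counter hitting 0 (never, for negative; at the first non-dot cell, for 0).
def Pre_move_number_group (whole_list : List String) (number_value : List String) (number_start_index : Int) (number_numrepeat : Int) : Prop :=
  1 ≤ number_numrepeat
instance (whole_list : List String) (number_value : List String) (number_start_index : Int) (number_numrepeat : Int) : Decidable (Pre_move_number_group whole_list number_value number_start_index number_numrepeat) := by unfold Pre_move_number_group; infer_instance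

def pvWitness_move_number_group : List String × List String × Int × Int := ([".", ".", "7", "7"], ["7", "7"], 2, 2)

def Spec_move_number_group (whole_list : List String) (number_value : List String) (number_start_index : Int) (number_numrepeat : Int) (out : List String) : Prop := out = move_number_group_alt whole_list number_value number_start_index number_numrepeat
instance (whole_list : List String) (number_value : List String) (number_start_index : Int) (number_numrepeat : Int) (out : List String) : Decidable (Spec_move_number_group whole_list number_value number_start_index number_numrepeat out) := by unfold Spec_move_number_group; infer_instance

-- ===== CLAIM (what is proved, stated in full; the proofs are below) =====
def Claim_equal_move_number_group : Prop := ∀ (whole_list : List String) (number_value : List String) (number_start_index : Int) (number_numrepeat : Int), Dom_move_number_group whole_list number_value number_start_index number_numrepeat → Pre_move_number_group whole_list number_value number_start_index number_numrepeat → Spec_move_number_group whole_list number_value number_start_index number_numrepeat (move_number_group whole_list number_value number_start_index number_numrepeat)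

-- ===== LEMMAS AND PROOFS =====

lemma maskOf_eq (start : Int) : ∀ (l : List String) (i : Nat),
    maskOf start l i = (l.take (start - i).toNat).map maskChar := by
  intro l
  induction l with
  | nil => intro i; simp [maskOf]
  | cons e rest ih =>
    intro i
    simp only [maskOf]
    split_ifs with h
    · have h1 : (start - i).toNat = (start - (i + 1)).toNat + 1 := by push_cast; omega
      rw [h1, List.take_succ_cons, List.map_cons, ih (i + 1)]
      push_cast
      rfl
    · have h1 : (start - i).toNat = 0 := by omega
      have h2 : (start - ((i : Nat) + 1 : Nat)).toNat = 0 := by push_cast; omega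
      rw [h1, List.take_zero, List.map_nil, ih (i + 1), h2, List.take_zero, List.map_nil]

-- trigger position of A's loop (the enumerate index i at which A returns early)
def trigA (start k : Int) : List String → Nat → Int → Option Nat
  | [], _, _ => none
  | e :: rest, i, ns =>
    let ns' : Int := if e = "." then ns + 1 else 0
    if (i : Int) < start then
      if ns' = k then some i else trigA start k rest (i + 1) ns'
    else trigA start k rest (i + 1) ns'

lemma loop_eq_trig (wl nv : List String) (start k : Int) :
    ∀ (l : List String) (i : Nat) (ns : Int),
    moveA_loop wl nv start k l i ns =
      match trigA start k l i ns with
      | none => wl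
      | some t => pySliceAssign (pySliceAssign wl ((t : Int) + 1 - k) ((t : Int) + 1) nv) start (start + k) ["."] := by
  intro l
  induction l with
  | nil => intro i ns; rfl
  | cons e rest ih =>
    intro i ns
    simp only [moveA_loop, trigA]
    split_ifs <;> simp [ih]

lemma trig_none_of_ge (start k : Int) :
    ∀ (l : List String) (i : Nat) (ns : Int), start ≤ (i : Int) → trigA start k l i ns = none := by
  intro l
  induction l with
  | nil => intro i ns _; rfl
  | cons e rest ih =>
    intro i ns h
    simp only [trigA]
    rw [if_neg (by omega)]
    exact ih (i + 1) _ (by push_cast; omega)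

lemma trig_append (start k : Int) (l2 : List String) :
    ∀ (l1 : List String) (i : Nat) (ns : Int),
      (∀ ns', trigA start k l2 (i + l1.length) ns' = none) →
      trigA start k (l1 ++ l2) i ns = trigA start k l1 i ns := by
  intro l1
  induction l1 with
  | nil => intro i ns h; simpa using h ns
  | cons e rest ih =>
    intro i ns h
    simp only [List.cons_append, trigA]
    split_ifs <;> first
      | rfl
      | · exact ih (i + 1) _ (by intro ns'; have := h ns'; simpa [Nat.add_assoc, Nat.add_comm 1 rest.length] using this)

-- window-ending-at-d predicate (decidable via bounded quantifier): with ns "free dots" of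
-- credit before xs, the dot-run ending at position d of xs has length ≥ kN
abbrev Win (xs : List String) (kN : Nat) (ns : Int) (d : Nat) : Prop :=
  d < xs.length ∧ (kN : Int) ≤ ns + d + 1 ∧ ∀ t : Nat, t ≤ d → ((d : Int) < t + kN → xs.getD t "" = ".")

lemma find_succ {p q : Nat → Prop} [DecidablePred p] [DecidablePred q]
    (h0 : ¬ p 0) (hiff : ∀ d, p (d + 1) ↔ q d) (hp : ∃ d, p d) (hq : ∃ d, q d) :
    Nat.find hp = Nat.find hq + 1 := by
  have h1 : p (Nat.find hq + 1) := (hiff _).2 (Nat.find_spec hq)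
  have h2 : Nat.find hp ≤ Nat.find hq + 1 := Nat.find_min' hp h1
  have h3 : Nat.find hp ≠ 0 := by
    intro h; exact h0 (h ▸ Nat.find_spec hp)
  obtain ⟨m, hm⟩ := Nat.exists_eq_succ_of_ne_zero h3
  have h4 : q m := by
    have hs := Nat.find_spec hp
    rw [hm] at hs
    exact (hiff m).1 hs
  have h5 : Nat.find hq ≤ m := Nat.find_min' hq h4
  omega

lemma win_zero_iff (e : String) (rest : List String) (kN : Nat) (ns : Int) (hk : 1 ≤ kN) :
    Win (e :: rest) kN ns 0 ↔ (e = "." ∧ (kN : Int) ≤ ns + 1) := by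
  constructor
  · rintro ⟨-, h2, h3⟩
    refine ⟨?_, by push_cast at h2 ⊢; omega⟩
    have := h3 0 le_rfl (by push_cast; omega)
    simpa using this
  · rintro ⟨he, hb⟩
    refine ⟨by simp, by push_cast at hb ⊢; omega, ?_⟩
    intro t ht _
    interval_cases t
    simpa using he

lemma win_succ_iff (e : String) (rest : List String) (kN : Nat) (ns : Int) (d : Nat)
    (hns : 0 ≤ ns) (hk : 1 ≤ kN) :
    Win (e :: rest) kN ns (d + 1) ↔ Win rest kN (if e = "." then ns + 1 else 0) d := by
  constructor
  · rintro ⟨h1, h2, h3⟩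
    refine ⟨by simpa using h1, ?_, ?_⟩
    · by_cases he : e = "."
      · rw [if_pos he]; push_cast at h2 ⊢; omega
      · rw [if_neg he]
        by_contra hlt
        push_neg at hlt
        have := h3 0 (by omega) (by push_cast at hlt ⊢; omega)
        simp at this
        exact he this
    · intro t ht hlt
      have := h3 (t + 1) (by omega) (by push_cast at hlt ⊢; omega)
      simpa using this
  · rintro ⟨h1, h2, h3⟩
    have hns' : (if e = "." then ns + 1 else 0) ≤ ns + 1 := by split_ifs <;> omega
    refine ⟨by simp; omega, by omega, ?_⟩
    intro t ht hlt
    match t with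
    | 0 =>
      simp only [List.getD_cons_zero]
      by_contra he
      rw [if_neg he] at h2
      push_cast at hlt h2
      omega
    | t + 1 =>
      have := h3 t (by omega) (by push_cast at hlt ⊢; omega)
      simpa using this

-- k ≥ 1: A triggers at the least d with a full dot-window ending at d
lemma trig_char (start : Int) (kN : Nat) (hk : 1 ≤ kN) :
    ∀ (xs : List String) (i : Nat) (ns : Int), 0 ≤ ns → ns < (kN : Int) → ((i : Int) + xs.length ≤ start) →
    trigA start (kN : Int) xs i ns =
      if h : ∃ d, Win xs kN ns d then some (i + Nat.find h) else none := by
  intro xs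
  induction xs with
  | nil =>
    intro i ns _ _ _
    rw [dif_neg (by rintro ⟨d, hd, -⟩; simp at hd)]
    rfl
  | cons e rest ih =>
    intro i ns hns0 hnsk h
    have hlen : (i : Int) + rest.length + 1 ≤ start := by
      simpa [add_assoc, add_comm (1:Int)] using h
    have hi : (i : Int) < start := by omega
    set ns' : Int := if e = "." then ns + 1 else 0 with hns'
    by_cases htr : ns' = (kN : Int)
    · have he : e = "." := by
        by_contra he
        rw [hns', if_neg he] at htr
        omega
      rw [hns', if_pos he] at htr
      simp only [trigA, if_pos he, if_pos hi, if_pos htr]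
      have hw0 : Win (e :: rest) kN ns 0 := (win_zero_iff e rest kN ns hk).2 ⟨he, by omega⟩
      rw [dif_pos ⟨0, hw0⟩]
      have hf : Nat.find (⟨0, hw0⟩ : ∃ d, Win (e :: rest) kN ns d) = 0 :=
        (Nat.find_eq_zero _).2 hw0
      rw [hf]
      simp
    · have hstep : trigA start (kN : Int) (e :: rest) i ns = trigA start (kN : Int) rest (i + 1) ns' := by
        simp only [trigA, if_pos hi]
        rw [← hns', if_neg htr]
      have hns0' : 0 ≤ ns' := by rw [hns']; split_ifs <;> omega
      have hnsk' : ns' < (kN : Int) := by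
        rw [hns']
        split_ifs with he
        · rw [hns', if_pos he] at htr; omega
        · omega
      rw [hstep, ih (i + 1) ns' hns0' hnsk' (by push_cast; omega)]
      have hnw0 : ¬ Win (e :: rest) kN ns 0 := by
        intro hw
        obtain ⟨he, hb⟩ := (win_zero_iff e rest kN ns hk).1 hw
        rw [hns', if_pos he] at htr
        omega
      by_cases hex : ∃ d, Win rest kN ns' d
      · have hexC : ∃ d, Win (e :: rest) kN ns d :=
          ⟨Nat.find hex + 1, (win_succ_iff e rest kN ns _ hns0 hk).2 (by rw [← hns']; exact Nat.find_spec hex)⟩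
        rw [dif_pos hex, dif_pos hexC]
        have := find_succ (p := fun d => Win (e :: rest) kN ns d) (q := fun d => Win rest kN ns' d)
          hnw0 (fun d => by rw [hns'] at *; exact win_succ_iff e rest kN ns d hns0 hk) hexC hex
        rw [this]
        congr 1
        omega
      · rw [dif_neg hex, dif_neg ?_]
        rintro ⟨d, hd⟩
        match d with
        | 0 => exact hnw0 hd
        | d + 1 => exact hex ⟨d, by rw [hns']; exact (win_succ_iff e rest kN ns d hns0 hk).1 hd⟩

-- replicate-prefix characterization
lemma rep_prefix (c d : Char) :
    ∀ (kN : Nat) (l : List Char), (List.replicate kN c <+: l) ↔ (kN ≤ l.length ∧ ∀ t < kN, l.getD t d = c) := by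
  intro kN
  induction kN with
  | zero => intro l; simp
  | succ k ihk =>
    intro l
    cases l with
    | nil => simp
    | cons x l' =>
      rw [List.replicate_succ, List.cons_prefix_cons, ihk l']
      constructor
      · rintro ⟨hc, h1, h2⟩
        refine ⟨by simpa using h1, ?_⟩
        intro t ht
        match t with
        | 0 => simpa using hc.symm
        | t + 1 => simpa using h2 t (by omega)
      · rintro ⟨h1, h2⟩
        have h0 : x = c := by simpa using h2 0 (by omega)
        refine ⟨h0.symm, by simpa using h1, ?_⟩
        intro t ht
        simpa using h2 (t + 1) (by omega)

lemma maskChar_eq_dot (e : String) : maskChar e = '.' ↔ e = "." := by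
  unfold maskChar
  split_ifs with h
  · simp [h]
  · simp [h]

lemma mask_getD (xs : List String) (t : Nat) (ht : t < xs.length) :
    (xs.map maskChar).getD t '#' = maskChar (xs.getD t "") := by
  rw [List.getD_eq_getElem?_getD, List.getD_eq_getElem?_getD, List.getElem?_map,
      List.getElem?_eq_getElem ht]
  simp [List.getElem?_eq_getElem ht]

lemma getD_drop' {α : Type} (l : List α) (i j : Nat) (d : α) :
    (l.drop i).getD j d = l.getD (i + j) d := by
  rw [List.getD_eq_getElem?_getD, List.getD_eq_getElem?_getD, List.getElem?_drop]

-- window-starting-at-j predicate over xs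
abbrev WStart (xs : List String) (kN : Nat) (j : Nat) : Prop :=
  j + kN ≤ xs.length ∧ ∀ t : Nat, j ≤ t → t < j + kN → xs.getD t "" = "."

lemma prefix_iff_wstart (xs : List String) (kN : Nat) (hk : 1 ≤ kN) (j : Nat) :
    (List.replicate kN '.' <+: (xs.map maskChar).drop j) ↔ WStart xs kN j := by
  rw [← List.map_drop, rep_prefix '.' '#']
  constructor
  · rintro ⟨h1, h2⟩
    simp only [List.length_map, List.length_drop] at h1
    refine ⟨by omega, ?_⟩
    intro t h3 h4
    have h5 := h2 (t - j) (by omega)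
    rw [mask_getD _ _ (by simp only [List.length_drop]; omega), getD_drop', maskChar_eq_dot] at h5
    have harr : j + (t - j) = t := by omega
    rw [harr] at h5
    exact h5
  · rintro ⟨h1, h2⟩
    refine ⟨by simp only [List.length_map, List.length_drop]; omega, ?_⟩
    intro t ht
    rw [mask_getD _ _ (by simp only [List.length_drop]; omega), getD_drop', maskChar_eq_dot]
    exact h2 (j + t) (by omega) (by omega)

lemma win_iff_wstart (xs : List String) (kN : Nat) (hk : 1 ≤ kN) (d : Nat) :
    Win xs kN 0 d ↔ (kN ≤ d + 1 ∧ WStart xs kN (d + 1 - kN)) := by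
  constructor
  · rintro ⟨h1, h2, h3⟩
    have hkd : kN ≤ d + 1 := by push_cast at h2; omega
    refine ⟨hkd, by omega, ?_⟩
    intro t h4 h5
    exact h3 t (by omega) (by push_cast; omega)
  · rintro ⟨hkd, h1, h2⟩
    refine ⟨by omega, by push_cast; omega, ?_⟩
    intro t h3 h4
    exact h2 t (by push_cast at h4; omega) (by omega)

theorem move_number_group_spec : Claim_equal_move_number_group := by
  intro wl nv start k _ hpre
  have hk1i : 1 ≤ k := hpre
  unfold Spec_move_number_group move_number_group
  simp only [move_number_group_alt]
  rw [loop_eq_trig]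
  rw [maskOf_eq, Nat.cast_zero, sub_zero]
  set xs : List String := wl.take start.toNat with hxs
  have hxlen : xs.length = min start.toNat wl.length := by
    rw [hxs, List.length_take]
  have hsplit : trigA start k wl 0 0 = trigA start k xs 0 0 := by
    conv_lhs => rw [← List.take_append_drop start.toNat wl]
    rw [← hxs]
    apply trig_append
    intro ns'
    by_cases hd : wl.length ≤ start.toNat
    · rw [List.drop_eq_nil_of_le hd]
      rfl
    · apply trig_none_of_ge
      rw [hxlen]
      push_cast
      omega
  rw [hsplit]
  have hk1 : 1 ≤ k.toNat := by omega
  have hkk : k = (k.toNat : Int) := by omega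
  set kN := k.toNat with hkN
  rw [hkk]
  set m : List Char := xs.map maskChar with hm
  have hmlen : PySem.Str.len (String.ofList m) = m.length := by simp
  rw [hmlen]
  have hfind : PySem.Str.find (String.ofList m) (String.ofList (List.replicate kN '.')) = PySem.Chars.find m (List.replicate kN '.') := by
    rw [PySem.Str.find_eq]
    simp
  rw [hfind]
  set sub : List Char := List.replicate kN '.' with hsub
  have hmx : m.length = xs.length := by rw [hm, List.length_map]
  by_cases hguard : (kN : Int) ≤ (m.length : Int)
  swap
  · -- the gap cannot fit in the prefix: B short-circuits to -1, A finds no window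
    rw [if_neg hguard]
    have hnoW : ¬ ∃ d, Win xs kN 0 d := by
      rintro ⟨d, hd1, hd2, -⟩
      push_cast at hd2 hguard
      omega
    by_cases hneg : start < 0
    · rw [trig_none_of_ge start (kN : Int) xs 0 0 (by push_cast; omega)]
      simp
    · have hxle : (xs.length : Int) ≤ start := by
        rw [hxlen]; push_cast; omega
      rw [trig_char start kN hk1 xs 0 0 le_rfl (by push_cast; omega) (by push_cast at hxle ⊢; omega)]
      rw [dif_neg hnoW]
      simp
  rw [if_pos hguard]
  set f : Int := PySem.Chars.find m sub with hf
  have hxle : (xs.length : Int) ≤ start := by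
    rw [hxlen]
    push_cast at hguard ⊢
    omega
  rw [trig_char start kN hk1 xs 0 0 le_rfl (by push_cast; omega) (by push_cast at hxle ⊢; omega)]
  by_cases hfneg : f = -1
  · have hninf : ¬ sub <:+: m := (PySem.Chars.find_eq_neg_one_iff m sub).1 hfneg
    have hnoW : ¬ ∃ d, Win xs kN 0 d := by
      rintro ⟨d, hd⟩
      obtain ⟨hkd, hws⟩ := (win_iff_wstart xs kN hk1 d).1 hd
      have hpre : sub <+: m.drop (d + 1 - kN) := (prefix_iff_wstart xs kN hk1 _).2 hws
      have hIn : PySem.Chars.isIn sub m = true :=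
        (PySem.Chars.exists_prefix_drop_iff_isIn sub m).1 ⟨_, hpre⟩
      rw [PySem.Chars.isIn_iff_infix] at hIn
      exact hninf hIn
    rw [dif_neg hnoW, if_neg (by simpa using hfneg)]
  · have hge : (0 : Int) ≤ f := by
      have := PySem.Chars.neg_one_le_find m sub
      omega
    have hspec := PySem.Chars.find_spec hge
    set j0 : Nat := f.toNat with hj0
    have hws0 : WStart xs kN j0 := (prefix_iff_wstart xs kN hk1 j0).1 hspec.1
    have hmin : ∀ j < j0, ¬ WStart xs kN j := by
      intro j hj hw
      exact hspec.2 j hj ((prefix_iff_wstart xs kN hk1 j).2 hw)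
    have hidx : j0 + kN - 1 + 1 - kN = j0 := by omega
    have hwin0 : Win xs kN 0 (j0 + kN - 1) :=
      (win_iff_wstart xs kN hk1 _).2 ⟨by omega, by rw [hidx]; exact hws0⟩
    have hexW : ∃ d, Win xs kN 0 d := ⟨j0 + kN - 1, hwin0⟩
    rw [dif_pos hexW, if_pos (by simpa using hfneg)]
    have hfind_eq : Nat.find hexW = j0 + kN - 1 := by
      rw [Nat.find_eq_iff]
      refine ⟨hwin0, ?_⟩
      intro d hd hWd
      obtain ⟨hkd, hws⟩ := (win_iff_wstart xs kN hk1 d).1 hWd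
      exact hmin (d + 1 - kN) (by omega) hws
    rw [hfind_eq]
    have hfj : f = (j0 : Int) := by omega
    have e1 : ((0 + (j0 + kN - 1) : Nat) : Int) + 1 - (kN : Int) = f := by
      rw [hfj]; push_cast; omega
    have e2 : ((0 + (j0 + kN - 1) : Nat) : Int) + 1 = f + (kN : Int) := by
      rw [hfj]; push_cast; omega
    simp only []
    rw [e1, e2]
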